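-- pv_equiv track=rewrite | github.com/NKcell/LeetCode | 1156. Swap For Longest Repeated Character Substring/_1156.py | maxRepOpt11
-- ===== SOURCE A (Python) =====
-- def maxRepOpt11(S):
--     import itertools
--     import collections
--     # We get the group's key and length first, e.g. 'aaabaaa' -> [[a , 3], [b, 1], [a, 3]
--     A = [[c, len(list(g))] for c, g in itertools.groupby(S)]
--     # We also generate a count dict for easy look up e.g. 'aaabaaa' -> {a: 6, b: 1}
--     count = collections.Counter(S)
--     # only extend 1 more, use min here to avoid the case that there's no extra char to extend
--     res = max(min(k + 1, count[c]) for c, k in A)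
--     # merge 2 groups together
--     for i in range(1, len(A) - 1):
--         # if both sides have the same char and are separated by only 1 char
--         if A[i - 1][0] == A[i + 1][0] and A[i][1] == 1:
--             # min here serves the same purpose
--             res = max(res, min(A[i - 1][1] + A[i + 1][1] + 1, count[A[i + 1][0]]))
--     return res
-- ===== SOURCE B (Python) =====
-- def maxRepOpt11(S):
--     # Per-distinct-character sliding window: for each char c scan S once with
--     # two counters, u = length of the current all-c streak and v = length of
--     # the current window containing at most one non-c char; at every non-c
--     # char (and at the end) the window closes and min(v, count[c]) is a
--     # candidate answer.
--     count = {}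
--     for ch in S:
--         count[ch] = count.get(ch, 0) + 1
--     res = 0
--     for c in count:
--         u = 0
--         v = 0
--         for ch in S:
--             if ch == c:
--                 u += 1
--                 v += 1
--             else:
--                 res = max(res, min(v, count[c]))
--                 u, v = 0, u + 1
--         res = max(res, min(v, count[c]))
--     return res
-- ===== Notes on version B (the rewrite author's own statement) =====
-- stated objective: alternative
-- what changed: A run-length-encodes the string with groupby and merges two same-char runs split by a single char; B never forms runs: for each distinct character c it rescans the string with a sliding window tracked by two counters (current all-c streak u, window v with at most one non-c char), taking min(v, count[c]) whenever the window closes.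
-- crash fix: On the empty string A raises ValueError (max() over an empty generator) while B naturally returns 0. — e.g. on maxRepOpt11(""): A raises ValueError, B returns 0
import Mathlib
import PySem

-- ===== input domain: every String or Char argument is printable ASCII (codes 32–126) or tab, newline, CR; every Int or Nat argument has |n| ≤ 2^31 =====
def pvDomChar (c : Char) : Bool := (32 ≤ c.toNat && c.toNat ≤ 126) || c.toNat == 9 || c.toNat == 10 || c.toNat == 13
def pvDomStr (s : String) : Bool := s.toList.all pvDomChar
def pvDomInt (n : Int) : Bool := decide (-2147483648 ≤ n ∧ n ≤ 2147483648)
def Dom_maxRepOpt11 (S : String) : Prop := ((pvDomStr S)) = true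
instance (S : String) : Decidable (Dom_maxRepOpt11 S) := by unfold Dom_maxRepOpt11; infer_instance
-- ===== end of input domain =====

-- B replaces A's groupby run list + merge-neighbouring-runs loop by a per-distinct-character
-- sliding-window rescan with two counters (objective: alternative algorithm, not faster).

-- ===== PORT A =====
-- itertools.groupby(S) rendered as run-length groups: [[c, len(list(g))] for c, g in groupby(S)]
def pvRunsA : List Char → List (Char × Int)
  | [] => []
  | c :: cs =>
    (c, 1 + (cs.takeWhile (fun x => x == c)).length) :: pvRunsA (cs.dropWhile (fun x => x == c))
termination_by l => l.length
decreasing_by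
  simpa using Nat.lt_succ_of_le (List.length_dropWhile_le _ _)

def maxRepOpt11 (S : String) : Int :=
  let A := pvRunsA S.toList
  let count := PySem.Dict.counter S.toList
  -- res = max(min(k + 1, count[c]) for c, k in A)  (empty generator → ValueError, excluded by Pre_)
  let res : Int :=
    match A.map (fun p => min (p.2 + 1) (count.getD p.1 0)) with
    | [] => 0
    | v :: vs => vs.foldl max v
  -- for i in range(1, len(A) - 1): …  (indices always in range, so pyGetD's default is never used)
  (PySem.List.pyRange 1 ((A.length : Int) - 1) 1).foldl (fun res i =>
    let l := PySem.List.pyGetD A (i - 1) ('?', 0)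
    let m := PySem.List.pyGetD A i ('?', 0)
    let r := PySem.List.pyGetD A (i + 1) ('?', 0)
    if l.1 == r.1 && m.2 == 1 then max res (min (l.2 + r.2 + 1) (count.getD r.1 0)) else res) res

-- ===== PORT B =====
-- B's inner loop for one character c: ch == c → u += 1; v += 1, else close the window
-- (candidate min(v, count[c])) and restart it behind the foreign char; the [] case is the
-- final res = max(res, min(v, count[c])) after the loop.
def pvInnerB (cnt : Int) (c : Char) : List Char → Int → Int → Int → Int
  | [], _, v, res => max res (min v cnt)
  | ch :: t, u, v, res =>
    if ch == c then pvInnerB cnt c t (u + 1) (v + 1) res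
    else pvInnerB cnt c t 0 (u + 1) (max res (min v cnt))

def maxRepOpt11_alt (S : String) : Int :=
  let count := S.toList.foldl (fun d ch => d.insert ch (d.getD ch 0 + 1)) PySem.Dict.empty
  count.keys.foldl (fun res c => pvInnerB (count.getD c 0) c S.toList 0 0 res) 0

-- ===== PRECONDITION & SPEC =====
-- Pre_ excludes only the empty string, on which Python A raises ValueError (max() over an empty generator).
def Pre_maxRepOpt11 (S : String) : Prop := S.toList ≠ []
instance (S : String) : Decidable (Pre_maxRepOpt11 S) := by unfold Pre_maxRepOpt11; infer_instance
def pvWitness_maxRepOpt11 : String := "aaabaaa"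

-- On the empty string A raises ValueError while B naturally returns 0 (no window ever opens).
def Raises_maxRepOpt11 (S : String) : Prop := S.toList = []
instance (S : String) : Decidable (Raises_maxRepOpt11 S) := by unfold Raises_maxRepOpt11; infer_instance
def pvRaiseWitness_maxRepOpt11 : String := ""
def pvRaiseWitnessOut_maxRepOpt11 : Int := 0

def Spec_maxRepOpt11 (S : String) (out : Int) : Prop := out = maxRepOpt11_alt S
instance (S : String) (out : Int) : Decidable (Spec_maxRepOpt11 S out) := by unfold Spec_maxRepOpt11; infer_instance

-- ===== CLAIM (what is proved, stated in full; the proofs are below) =====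
def Claim_equal_maxRepOpt11 : Prop := ∀ (S : String), Dom_maxRepOpt11 S → Pre_maxRepOpt11 S → Spec_maxRepOpt11 S (maxRepOpt11 S)
def Claim_raises_maxRepOpt11 : Prop := (∀ (S : String), Dom_maxRepOpt11 S → Raises_maxRepOpt11 S → ¬ Pre_maxRepOpt11 S) ∧ (Dom_maxRepOpt11 pvRaiseWitness_maxRepOpt11 ∧ Raises_maxRepOpt11 pvRaiseWitness_maxRepOpt11 ∧ maxRepOpt11_alt pvRaiseWitness_maxRepOpt11 = pvRaiseWitnessOut_maxRepOpt11)

-- ===== LEMMAS AND PROOFS =====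

-- ---------- A-side normal form: windows of three consecutive runs ----------
def pvWin {α : Type} : List α → List (α × α × α)
  | a :: b :: c :: ts => (a, b, c) :: pvWin (b :: c :: ts)
  | _ => []

-- the merge step of A's for-loop, on a triple of consecutive runs
def pvMStep (cnt : PySem.Dict Char Int) (res : Int)
    (t : (Char × Int) × (Char × Int) × (Char × Int)) : Int :=
  if t.1.1 == t.2.2.1 && t.2.1.2 == 1
  then max res (min (t.1.2 + t.2.2.2 + 1) (cnt.getD t.2.2.1 0)) else res

def pvF (cnt : PySem.Dict Char Int) (p : Char × Int) : Int := min (p.2 + 1) (cnt.getD p.1 0)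

-- A's index loop over range(1, len(A)-1) equals the structural fold over 3-windows
theorem pvLoopA_eq_win (cnt : PySem.Dict Char Int) :
    ∀ (R : List (Char × Int)) (res : Int),
      (PySem.List.pyRange 1 ((R.length : Int) - 1) 1).foldl (fun res i =>
        let l := PySem.List.pyGetD R (i - 1) ('?', 0)
        let m := PySem.List.pyGetD R i ('?', 0)
        let r := PySem.List.pyGetD R (i + 1) ('?', 0)
        if l.1 == r.1 && m.2 == 1 then max res (min (l.2 + r.2 + 1) (cnt.getD r.1 0)) else res) res
      = (pvWin R).foldl (pvMStep cnt) res := by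
  intro R
  induction R using pvWin.induct with
  | case1 a b c ts ih =>
    intro res
    have hlen : ((((a :: b :: c :: ts).length : Int)) - 1) = (ts.length : Int) + 2 := by
      simp; omega
    rw [hlen, PySem.List.pyRange_one_cons (by omega), List.foldl_cons]
    have hget0 : PySem.List.pyGetD (a :: b :: c :: ts) ((1:Int) - 1) ('?', 0) = a := by
      norm_num [PySem.List.pyGetD_ofNat']
    have hget1 : PySem.List.pyGetD (a :: b :: c :: ts) (1:Int) ('?', 0) = b := by
      norm_num [PySem.List.pyGetD_ofNat']
    have hget2 : PySem.List.pyGetD (a :: b :: c :: ts) ((1:Int) + 1) ('?', 0) = c := by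
      norm_num [PySem.List.pyGetD_ofNat']
    simp only [hget0, hget1, hget2]
    have hstep : (if a.1 == c.1 && b.2 == 1
        then max res (min (a.2 + c.2 + 1) (cnt.getD c.1 0)) else res)
        = pvMStep cnt res (a, b, c) := rfl
    rw [hstep]
    have hwin : pvWin (a :: b :: c :: ts) = (a, b, c) :: pvWin (b :: c :: ts) := rfl
    rw [hwin, List.foldl_cons]
    have hlen' : ((((b :: c :: ts).length : Int)) - 1) = (ts.length : Int) + 1 := by
      simp
    rw [← ih (pvMStep cnt res (a, b, c)), hlen']
    rw [PySem.List.pyRange_one, PySem.List.pyRange_one]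
    have hnat : ((ts.length : Int) + 2 - (1 + 1)).toNat = ts.length := by omega
    have hnat' : ((ts.length : Int) + 1 - 1).toNat = ts.length := by omega
    rw [hnat, hnat', List.foldl_map, List.foldl_map]
    apply PySem.List.foldl_congr_mem'
    intro k _ acc
    have hshift : ∀ (x : Char × ℤ) (xs : List (Char × ℤ)) (i : Int), 0 ≤ i →
        PySem.List.pyGetD (x :: xs) (i + 1) ('?', 0) = PySem.List.pyGetD xs i ('?', 0) := by
      intro x xs i hi
      obtain ⟨n, rfl⟩ := Int.eq_ofNat_of_zero_le hi
      rw [show ((n : Int) + 1) = ((n + 1 : Nat) : Int) by push_cast; ring,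
        PySem.List.pyGetD_natCast, PySem.List.pyGetD_natCast]
      simp
    have p1 : PySem.List.pyGetD (a :: b :: c :: ts) (1 + 1 + (k : Int) - 1) ('?', 0)
        = PySem.List.pyGetD (b :: c :: ts) (k : Int) ('?', 0) := by
      rw [show (1 + 1 + (k : Int) - 1) = ((k : Int) + 1) by ring]
      exact hshift _ _ _ (by positivity)
    have p2 : PySem.List.pyGetD (a :: b :: c :: ts) (1 + 1 + (k : Int)) ('?', 0)
        = PySem.List.pyGetD (b :: c :: ts) (1 + (k : Int)) ('?', 0) := by
      rw [show (1 + 1 + (k : Int)) = ((1 + (k : Int)) + 1) by ring]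
      exact hshift _ _ _ (by positivity)
    have p3 : PySem.List.pyGetD (a :: b :: c :: ts) (1 + 1 + (k : Int) + 1) ('?', 0)
        = PySem.List.pyGetD (b :: c :: ts) (1 + (k : Int) + 1) ('?', 0) := by
      rw [show (1 + 1 + (k : Int) + 1) = ((1 + (k : Int) + 1) + 1) by ring]
      exact hshift _ _ _ (by positivity)
    have q1 : (1 : Int) + (k : Int) - 1 = (k : Int) := by ring
    simp only [p1, p2, p3, q1]
  | case2 R h =>
    intro res
    rcases R with _ | ⟨a, _ | ⟨b, _ | ⟨c, ts⟩⟩⟩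
    · simp [pvWin, PySem.List.pyRange_one_eq_nil]
    · rw [PySem.List.pyRange_one_eq_nil (by simp)]; rfl
    · rw [PySem.List.pyRange_one_eq_nil (by simp)]; rfl
    · exact (h a b c ts rfl).elim

-- ---------- B-side normal form: candidate lists ----------

-- candidates emitted by pvInnerB (every time the window closes, plus the final one)
def pvCharCands (cnt : Int) (c : Char) : List Char → Int → Int → List Int
  | [], _, v => [min v cnt]
  | ch :: t, u, v =>
    if ch == c then pvCharCands cnt c t (u + 1) (v + 1)
    else min v cnt :: pvCharCands cnt c t 0 (u + 1)

theorem pvInnerB_eq_foldl (cnt : Int) (c : Char) :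
    ∀ (L : List Char) (u v res : Int),
      pvInnerB cnt c L u v res = List.foldl max res (pvCharCands cnt c L u v) := by
  intro L
  induction L with
  | nil => intro u v res; simp [pvInnerB, pvCharCands]
  | cons ch t ih =>
    intro u v res
    by_cases h : (ch == c) = true <;> simp [pvInnerB, pvCharCands, h, ih]

-- the same candidates computed run by run
def pvRunCands (cnt : Int) (c : Char) : List (Char × Int) → Int → Int → List Int
  | [], _, v => [min v cnt]
  | (d, k) :: R, u, v =>
    if d = c then pvRunCands cnt c R (u + k) (v + k)
    else if k = 1 then min v cnt :: pvRunCands cnt c R 0 (u + 1)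
    else min v cnt :: min (u + 1) cnt ::
      (List.replicate (k - 2).toNat (min 1 cnt) ++ pvRunCands cnt c R 0 1)

theorem pvCC_block_same (cnt : Int) (c : Char) :
    ∀ (blk : List Char) (T : List Char) (u v : Int), (∀ x ∈ blk, x = c) →
      pvCharCands cnt c (blk ++ T) u v
        = pvCharCands cnt c T (u + blk.length) (v + blk.length) := by
  intro blk
  induction blk with
  | nil => intro T u v _; simp
  | cons b blk' ih =>
    intro T u v hall
    have hb : (b == c) = true := by
      simp [hall b (by simp)]
    simp only [List.cons_append, pvCharCands, hb, if_pos]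
    rw [ih _ _ _ (fun x hx => hall x (by simp [hx]))]
    have h1 : u + 1 + (blk'.length : Int) = u + ((b :: blk').length : Int) := by
      push_cast [List.length_cons]; omega
    have h2 : v + 1 + (blk'.length : Int) = v + ((b :: blk').length : Int) := by
      push_cast [List.length_cons]; omega
    rw [h1, h2]

theorem pvCC_block_other1 (cnt : Int) (c : Char) :
    ∀ (blk : List Char) (T : List Char), (∀ x ∈ blk, (x == c) = false) →
      pvCharCands cnt c (blk ++ T) 0 1
        = List.replicate blk.length (min 1 cnt) ++ pvCharCands cnt c T 0 1 := by
  intro blk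
  induction blk with
  | nil => intro T _; simp
  | cons b blk' ih =>
    intro T hall
    have hb : (b == c) = false := hall b (by simp)
    simp only [List.cons_append, pvCharCands, hb, Bool.false_eq_true, if_false,
      List.length_cons, List.replicate_succ]
    rw [show (0 : Int) + 1 = 1 by norm_num, ih _ (fun x hx => hall x (by simp [hx]))]

theorem pvCharCands_eq_runCands (cnt : Int) (c : Char) :
    ∀ (L : List Char) (u v : Int),
      pvCharCands cnt c L u v = pvRunCands cnt c (pvRunsA L) u v := by
  intro L
  induction L using pvRunsA.induct with
  | case1 => intro u v; simp [pvCharCands, pvRunsA, pvRunCands]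
  | case2 ch cs ih =>
    intro u v
    have hcs : cs.takeWhile (fun x => x == ch) ++ cs.dropWhile (fun x => x == ch) = cs :=
      List.takeWhile_append_dropWhile
    have hblk : ∀ x ∈ cs.takeWhile (fun x => x == ch), x = ch := by
      intro x hx
      have := List.mem_takeWhile_imp hx
      simpa using this
    rw [pvRunsA]
    by_cases hc : ch = c
    · subst hc
      have hh : (ch == ch) = true := by simp
      simp only [pvCharCands, hh, if_pos, pvRunCands]
      conv_lhs => rw [← hcs]
      rw [pvCC_block_same cnt ch _ _ _ _ hblk, ih]
      congr 1 <;> push_cast <;> omega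
    · have hh : (ch == c) = false := by simp [hc]
      simp only [pvCharCands, hh, Bool.false_eq_true, if_false]
      cases hblkc : cs.takeWhile (fun x => x == ch) with
      | nil =>
        have hrest : cs.dropWhile (fun x => x == ch) = cs := by
          conv_rhs => rw [← hcs, hblkc]
          simp
        rw [hrest] at ih ⊢
        simp only [pvRunCands, hc, if_false, List.length_nil, Nat.cast_zero,
          add_zero, if_true]
        rw [ih]
      | cons b blk' =>
        have hall : ∀ x ∈ b :: blk', x = ch := by rw [← hblkc]; exact hblk
        have hallc : ∀ x ∈ blk', (x == c) = false := by
          intro x hx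
          have := hall x (by simp [hx])
          simp [this, hc]
        have hbc : (b == c) = false := by
          have := hall b (by simp)
          simp [this, hc]
        have hsplit : cs = b :: (blk' ++ cs.dropWhile (fun x => x == ch)) := by
          conv_lhs => rw [← hcs, hblkc]
          simp
        conv_lhs => rw [hsplit]
        simp only [pvCharCands, hbc, Bool.false_eq_true, if_false]
        rw [show (0 : Int) + 1 = 1 by norm_num, pvCC_block_other1 cnt c _ _ hallc, ih]
        have hk1 : ¬ ((1 : Int) + ((b :: blk').length : Int) = 1) := by
          push_cast [List.length_cons]; omega
        have hk2 : ((1 : Int) + ((b :: blk').length : Int) - 2).toNat = blk'.length := by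
          push_cast [List.length_cons]; omega
        simp only [pvRunCands, hc, if_false, hk1, hk2]


-- ---------- structural facts about pvRunsA ----------

theorem pvCount_all_eq (c d : Char) : ∀ (l : List Char), (∀ x ∈ l, x = d) →
    l.count c = if c = d then l.length else 0 := by
  intro l
  induction l with
  | nil => intro _; simp
  | cons b t ih =>
    intro hall
    have hb : b = d := hall b (by simp)
    subst hb
    rw [List.count_cons, ih (fun x hx => hall x (by simp [hx]))]
    by_cases h : c = b
    · subst h; simp
    · have hbc : (b == c) = false := by simpa using fun e => h e.symm
      simp [h, hbc]

def pvSumC (c : Char) (R : List (Char × Int)) : Int :=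
  (R.map (fun p => if p.1 = c then p.2 else 0)).sum

theorem pvCount_eq_sumC (c : Char) : ∀ (L : List Char),
    (L.count c : Int) = pvSumC c (pvRunsA L) := by
  intro L
  induction L using pvRunsA.induct with
  | case1 => simp [pvRunsA, pvSumC]
  | case2 ch cs ih =>
    have hcs : cs.takeWhile (fun x => x == ch) ++ cs.dropWhile (fun x => x == ch) = cs :=
      List.takeWhile_append_dropWhile
    have hblk : ∀ x ∈ cs.takeWhile (fun x => x == ch), x = ch := by
      intro x hx
      have := List.mem_takeWhile_imp hx
      simpa using this
    have hcnt : (ch :: cs).count c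
        = (cs.takeWhile (fun x => x == ch)).count c
          + (cs.dropWhile (fun x => x == ch)).count c
          + (if ch == c then 1 else 0) := by
      conv_lhs => rw [← hcs]
      rw [List.count_cons, List.count_append]
    rw [pvRunsA, pvSumC, List.map_cons, List.sum_cons, ← pvSumC]
    rw [hcnt, pvCount_all_eq c ch _ hblk, ← ih]
    by_cases h : ch = c
    · subst h
      simp only [if_pos rfl, beq_self_eq_true, if_true]
      try (push_cast; ring)
    · have h' : ¬ c = ch := fun hcc => h hcc.symm
      have hbeq : (ch == c) = false := by simpa using h
      simp only [if_neg h, if_neg h', hbeq, Bool.false_eq_true, if_false]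
      try (push_cast; ring)

theorem pvRuns_pos : ∀ (L : List Char) (p : Char × Int), p ∈ pvRunsA L → 1 ≤ p.2 := by
  intro L
  induction L using pvRunsA.induct with
  | case1 => intro p hp; simp [pvRunsA] at hp
  | case2 ch cs ih =>
    intro p hp
    rw [pvRunsA] at hp
    rcases List.mem_cons.mp hp with h | h
    · subst h
      show (1 : Int) ≤ 1 + ((cs.takeWhile (fun x => x == ch)).length : Int)
      omega
    · exact ih p h

theorem pvRuns_char_mem : ∀ (L : List Char) (p : Char × Int), p ∈ pvRunsA L → p.1 ∈ L := by
  intro L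
  induction L using pvRunsA.induct with
  | case1 => intro p hp; simp [pvRunsA] at hp
  | case2 ch cs ih =>
    intro p hp
    rw [pvRunsA] at hp
    rcases List.mem_cons.mp hp with h | h
    · subst h; simp
    · exact List.mem_cons_of_mem _ ((List.dropWhile_sublist _).mem (ih p h))

theorem pvRuns_chain : ∀ (L : List Char),
    List.IsChain (fun a b : Char × Int => a.1 ≠ b.1) (pvRunsA L) := by
  intro L
  induction L using pvRunsA.induct with
  | case1 => simp [pvRunsA]
  | case2 ch cs ih =>
    rw [pvRunsA, List.isChain_cons]
    refine ⟨?_, ih⟩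
    intro y hy
    cases hd : cs.dropWhile (fun x => x == ch) with
    | nil => rw [hd] at hy; simp [pvRunsA] at hy
    | cons d ds =>
      rw [hd, pvRunsA] at hy
      simp only [List.head?_cons, Option.mem_some_iff] at hy
      have hdn : (d == ch) = false := by
        have := List.head_dropWhile_not (fun x => x == ch) (l := cs) (w := by simp [hd])
        simpa [hd] using this
      subst hy
      simpa using fun h => by simp [h] at hdn

-- ---------- windows of three consecutive runs ----------

theorem pvWin_cons_sub {α : Type} (x : α) :
    ∀ (l : List α) (t : α × α × α), t ∈ pvWin l → t ∈ pvWin (x :: l) := by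
  intro l t ht
  match l with
  | [] => simp [pvWin] at ht
  | [a] => simp [pvWin] at ht
  | a :: b :: ts =>
    have : pvWin (x :: a :: b :: ts) = (x, a, b) :: pvWin (a :: b :: ts) := rfl
    rw [this]
    exact List.mem_cons_of_mem _ ht

theorem pvWin_mem_of_decomp {α : Type} :
    ∀ (X : List α) (a b c : α) (Y : List α), (a, b, c) ∈ pvWin (X ++ a :: b :: c :: Y) := by
  intro X
  induction X with
  | nil =>
    intro a b c Y
    simp only [List.nil_append]
    rw [show pvWin (a :: b :: c :: Y) = (a,b,c) :: pvWin (b :: c :: Y) from rfl]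
    simp
  | cons x X' ih => intro a b c Y; exact pvWin_cons_sub x _ _ (ih a b c Y)

theorem pvWin_decomp {α : Type} :
    ∀ (l : List α) (t : α × α × α), t ∈ pvWin l →
      ∃ X Y, l = X ++ t.1 :: t.2.1 :: t.2.2 :: Y := by
  intro l
  induction l using pvWin.induct with
  | case1 a b c ts ih =>
    intro t ht
    rw [show pvWin (a :: b :: c :: ts) = (a,b,c) :: pvWin (b :: c :: ts) from rfl] at ht
    rcases List.mem_cons.mp ht with h | h
    · subst h; exact ⟨[], ts, rfl⟩
    · obtain ⟨X, Y, hXY⟩ := ih t h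
      exact ⟨a :: X, Y, by simp [hXY]⟩
  | case2 l h =>
    intro t ht
    rcases l with _ | ⟨a, _ | ⟨b, _ | ⟨c, ts⟩⟩⟩
    · simp [pvWin] at ht
    · simp [pvWin] at ht
    · simp [pvWin] at ht
    · exact (h a b c ts rfl).elim

-- ---------- fold bound lemmas ----------

theorem pvFoldlMax_le : ∀ (l : List Int) (r m : Int), r ≤ m → (∀ x ∈ l, x ≤ m) →
    l.foldl max r ≤ m := by
  intro l
  induction l with
  | nil => intro r m h _; simpa using h
  | cons x t ih =>
    intro r m h hall
    exact ih _ _ (max_le h (hall x (by simp))) (fun y hy => hall y (by simp [hy]))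

theorem pvMStep_le_foldl (cnt : PySem.Dict Char Int) :
    ∀ (W : List ((Char × Int) × (Char × Int) × (Char × Int))) (r : Int),
      r ≤ W.foldl (pvMStep cnt) r := by
  intro W
  induction W with
  | nil => intro r; simp
  | cons t W' ih =>
    intro r
    refine le_trans ?_ (ih (pvMStep cnt r t))
    unfold pvMStep
    split <;> simp

theorem pvMStep_mem_le_foldl (cnt : PySem.Dict Char Int) :
    ∀ (W : List ((Char × Int) × (Char × Int) × (Char × Int))) (r : Int) t, t ∈ W →
      (t.1.1 == t.2.2.1 && t.2.1.2 == 1) = true →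
      min (t.1.2 + t.2.2.2 + 1) (cnt.getD t.2.2.1 0) ≤ W.foldl (pvMStep cnt) r := by
  intro W
  induction W with
  | nil => intro r t ht _; simp at ht
  | cons s W' ih =>
    intro r t ht hc
    rcases List.mem_cons.mp ht with h | h
    · subst h
      refine le_trans ?_ (pvMStep_le_foldl cnt W' (pvMStep cnt r t))
      unfold pvMStep
      rw [if_pos hc]
      exact le_max_right _ _
    · exact ih _ t h hc

theorem pvMStep_foldl_le (cnt : PySem.Dict Char Int) :
    ∀ (W : List ((Char × Int) × (Char × Int) × (Char × Int))) (r m : Int), r ≤ m →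
      (∀ t ∈ W, (t.1.1 == t.2.2.1 && t.2.1.2 == 1) = true →
        min (t.1.2 + t.2.2.2 + 1) (cnt.getD t.2.2.1 0) ≤ m) →
      W.foldl (pvMStep cnt) r ≤ m := by
  intro W
  induction W with
  | nil => intro r m h _; simpa using h
  | cons t W' ih =>
    intro r m h hall
    refine ih _ _ ?_ (fun s hs => hall s (by simp [hs]))
    unfold pvMStep
    split
    · exact max_le h (hall t (by simp) (by assumption))
    · exact h


-- ---------- lower bounds: every A-term is at most some B candidate ----------

-- the window being tracked is eventually emitted (v only grows until a window closes)
theorem pvE (cnt : Int) (c : Char) :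
    ∀ (R : List (Char × Int)) (u v : Int), (∀ p ∈ R, 1 ≤ p.2) →
      ∃ x ∈ pvRunCands cnt c R u v, min v cnt ≤ x := by
  intro R
  induction R with
  | nil =>
    intro u v _
    exact ⟨min v cnt, by simp [pvRunCands], le_refl _⟩
  | cons p R' ih =>
    intro u v hpos
    obtain ⟨d, k⟩ := p
    have hk : 1 ≤ k := hpos (d, k) (by simp)
    by_cases hd : c = d
    · subst hd
      simp only [pvRunCands, if_pos rfl]
      obtain ⟨x, hx, hle⟩ := ih (u + k) (v + k) (fun p hp => hpos p (by simp [hp]))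
      exact ⟨x, hx, le_trans (by omega) hle⟩
    · have hd' : ¬ d = c := fun h => hd h.symm
      simp only [pvRunCands, if_neg hd']
      by_cases hk1 : k = 1
      · simp only [if_pos hk1]
        exact ⟨min v cnt, by simp, le_refl _⟩
      · simp only [if_neg hk1]
        exact ⟨min v cnt, by simp, le_refl _⟩

-- each run of c's, extended by one, is at most some B candidate
theorem pvArun (cnt : Int) (c : Char) :
    ∀ (R : List (Char × Int)) (u v k : Int), (∀ p ∈ R, 1 ≤ p.2) →
      List.IsChain (fun a b : Char × Int => a.1 ≠ b.1) R →
      0 ≤ u → 0 ≤ v → (1 ≤ v ∨ cnt ≤ pvSumC c R) → (c, k) ∈ R →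
      ∃ x ∈ pvRunCands cnt c R u v, min (k + 1) cnt ≤ x := by
  intro R
  induction R with
  | nil => intro u v k _ _ _ _ _ hm; simp at hm
  | cons p R' ih =>
    intro u v k hpos hch hu hv hdis hm
    obtain ⟨d, m⟩ := p
    have hmk : 1 ≤ m := hpos (d, m) (by simp)
    have hpos' : ∀ p ∈ R', 1 ≤ p.2 := fun p hp => hpos p (by simp [hp])
    have hch' : List.IsChain (fun a b : Char × Int => a.1 ≠ b.1) R' :=
      (List.isChain_cons.mp hch).2
    rcases List.mem_cons.mp hm with hh | ht
    · -- the run itself is the head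
      have hd : c = d := congrArg Prod.fst hh
      have hkm : k = m := congrArg Prod.snd hh
      subst hd; subst hkm
      simp only [pvRunCands, if_pos rfl]
      rcases hdis with hv1 | hsum
      · obtain ⟨x, hx, hle⟩ := pvE cnt c R' (u + k) (v + k) hpos'
        exact ⟨x, hx, le_trans (by omega) hle⟩
      · cases R' with
        | nil =>
          refine ⟨min (v + k) cnt, by simp [pvRunCands], ?_⟩
          simp only [pvSumC, List.map_cons, List.map_nil, List.sum_cons, List.sum_nil,
            if_pos rfl, add_zero] at hsum
          omega
        | cons q R'' =>
          obtain ⟨e, m'⟩ := q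
          have hne := (List.isChain_cons_cons.mp hch).1
          have hec : ¬ e = c := fun h => hne (by simp [h])
          have hm' : 1 ≤ m' := hpos' (e, m') (by simp)
          simp only [pvRunCands, if_neg hec]
          by_cases hm'1 : m' = 1
          · simp only [if_pos hm'1]
            obtain ⟨x, hx, hle⟩ := pvE cnt c R'' 0 (u + k + 1)
              (fun p hp => hpos' p (by simp [hp]))
            exact ⟨x, by simp [hx], le_trans (by omega) hle⟩
          · simp only [if_neg hm'1]
            exact ⟨min (u + k + 1) cnt, by simp, by omega⟩
    · -- the run is further on
      by_cases hd : c = d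
      · subst hd
        simp only [pvRunCands, if_pos rfl]
        exact ih (u + m) (v + m) k hpos' hch' (by omega) (by omega) (Or.inl (by omega)) ht
      · have hd' : ¬ d = c := fun h => hd h.symm
        simp only [pvRunCands, if_neg hd']
        by_cases hm1 : m = 1
        · simp only [if_pos hm1]
          obtain ⟨x, hx, hle⟩ := ih 0 (u + 1) k hpos' hch' (le_refl _) (by omega)
            (Or.inl (by omega)) ht
          exact ⟨x, by simp [hx], hle⟩
        · simp only [if_neg hm1]
          obtain ⟨x, hx, hle⟩ := ih 0 1 k hpos' hch' (le_refl _) (by omega)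
            (Or.inl (by omega)) ht
          exact ⟨x, by simp [hx], hle⟩

-- two runs of c separated by a single foreign char are at most some B candidate
theorem pvAmerge (cnt : Int) (c : Char) :
    ∀ (X : List (Char × Int)) (R : List (Char × Int)) (u v k1 k2 : Int) (d : Char)
      (Y : List (Char × Int)),
      R = X ++ (c, k1) :: (d, 1) :: (c, k2) :: Y → ¬ d = c → (∀ p ∈ R, 1 ≤ p.2) →
      0 ≤ u → 0 ≤ v →
      ∃ x ∈ pvRunCands cnt c R u v, min (k1 + k2 + 1) cnt ≤ x := by
  intro X
  induction X with
  | nil =>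
    intro R u v k1 k2 d Y hR hdc hpos hu hv
    subst hR
    simp only [List.nil_append, pvRunCands, if_pos rfl, if_neg hdc]
    obtain ⟨x, hx, hle⟩ := pvE cnt c Y k2 (u + k1 + 1 + k2)
      (fun p hp => hpos p (by simp [hp]))
    exact ⟨x, by simp [hx], le_trans (by omega) hle⟩
  | cons p X' ih =>
    intro R u v k1 k2 d Y hR hdc hpos hu hv
    subst hR
    obtain ⟨e, m⟩ := p
    have hm : 1 ≤ m := hpos (e, m) (by simp)
    have hpos' : ∀ q ∈ X' ++ (c, k1) :: (d, 1) :: (c, k2) :: Y, 1 ≤ q.2 :=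
      fun q hq => hpos q (by simp [hq])
    simp only [List.cons_append]
    by_cases he : c = e
    · subst he
      simp only [pvRunCands, if_pos rfl]
      exact ih _ (u + m) (v + m) k1 k2 d Y rfl hdc hpos' (by omega) (by omega)
    · have he' : ¬ e = c := fun h => he h.symm
      simp only [pvRunCands, if_neg he']
      by_cases hm1 : m = 1
      · simp only [if_pos hm1]
        obtain ⟨x, hx, hle⟩ := ih _ 0 (u + 1) k1 k2 d Y rfl hdc hpos' (le_refl _) (by omega)
        exact ⟨x, by simp [hx], hle⟩
      · simp only [if_neg hm1]
        obtain ⟨x, hx, hle⟩ := ih _ 0 1 k1 k2 d Y rfl hdc hpos' (le_refl _) (by omega)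
        exact ⟨x, by simp [hx], hle⟩

-- ---------- upper bound: every B candidate is at most A's answer ----------

theorem pvBleA (cnt : Int) (c : Char) (R0 : List (Char × Int)) (M : Int)
    (G1 : ∀ k : Int, (c, k) ∈ R0 → min (k + 1) cnt ≤ M)
    (G2 : ∀ (X : List (Char × Int)) (k1 : Int) (d : Char) (k2 : Int) (Y : List (Char × Int)),
      R0 = X ++ (c, k1) :: (d, 1) :: (c, k2) :: Y → min (k1 + k2 + 1) cnt ≤ M)
    (G3 : 1 ≤ M) (Gc : 1 ≤ cnt)
    (Gpos : ∀ p ∈ R0, 1 ≤ p.2)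
    (Gch : List.IsChain (fun a b : Char × Int => a.1 ≠ b.1) R0) :
    ∀ (R X : List (Char × Int)) (u v : Int),
      R0 = X ++ R → 0 ≤ u → 0 ≤ v →
      min v cnt ≤ M →
      (∀ (k : Int) rest, R = (c, k) :: rest → u = 0) →
      (∀ (k : Int) rest, R = (c, k) :: rest → min (v + k) cnt ≤ M) →
      min (u + 1) cnt ≤ M →
      (0 < u → ∃ X', R0 = X' ++ (c, u) :: R) →
      ∀ x ∈ pvRunCands cnt c R u v, x ≤ M := by
  intro R
  induction R with
  | nil =>
    intro X u v _ _ _ h1 _ _ _ _ x hx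
    simp only [pvRunCands] at hx
    rcases List.mem_singleton.mp hx with rfl
    exact h1
  | cons p rest ih =>
    intro X u v hsuf hu hv h1 h2 h3 h4 h5 x hx
    obtain ⟨d, k⟩ := p
    have hk : 1 ≤ k := Gpos (d, k) (by rw [hsuf]; simp)
    by_cases hd : c = d
    · -- a run of c: the window grows
      subst hd
      have hu0 : u = 0 := h2 k rest rfl
      subst hu0
      simp only [pvRunCands, if_pos rfl] at hx
      have hnotc : ∀ (k' : Int) rest', rest = (c, k') :: rest' → False := by
        intro k' rest' hr
        subst hr
        have hsfx : List.IsChain (fun a b : Char × Int => a.1 ≠ b.1)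
            ((c, k) :: (c, k') :: rest') := Gch.suffix ⟨X, hsuf.symm⟩
        exact (List.isChain_cons_cons.mp hsfx).1 rfl
      refine ih (X ++ [(c, k)]) (0 + k) (v + k) (by simp [hsuf]) (by omega) (by omega)
        (h3 k rest rfl) ?_ ?_ ?_ ?_ x hx
      · intro k' rest' hr; exact absurd (hnotc k' rest' hr) (fun h => h)
      · intro k' rest' hr; exact absurd (hnotc k' rest' hr) (fun h => h)
      · have := G1 k (by rw [hsuf]; simp)
        omega
      · intro _
        exact ⟨X, by simpa using hsuf⟩
    · have hd' : ¬ d = c := fun h => hd h.symm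
      simp only [pvRunCands, if_neg hd'] at hx
      by_cases hk1 : k = 1
      · subst hk1
        simp only [if_pos rfl] at hx
        rcases List.mem_cons.mp hx with rfl | hx'
        · exact h1
        · refine ih (X ++ [(d, 1)]) 0 (u + 1) (by simp [hsuf]) (le_refl _) (by omega)
            h4 (fun _ _ _ => rfl) ?_ (by omega) (by omega) x hx'
          intro k2 rest' hr
          subst hr
          by_cases hupos : 0 < u
          · obtain ⟨X', hX'⟩ := h5 hupos
            have := G2 X' u d k2 rest' hX'
            omega
          · have hu0 : u = 0 := by omega
            subst hu0
            have := G1 k2 (by rw [hsuf]; simp)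
            omega
      · simp only [if_neg hk1] at hx
        rcases List.mem_cons.mp hx with rfl | hx'
        · exact h1
        · rcases List.mem_cons.mp hx' with rfl | hx''
          · exact h4
          · rcases List.mem_append.mp hx'' with hrep | hx3
            · have := List.eq_of_mem_replicate hrep
              subst this
              omega
            · refine ih (X ++ [(d, k)]) 0 1 (by simp [hsuf]) (le_refl _) (by omega)
                (by omega) (fun _ _ _ => rfl) ?_ (by omega) (by omega) x hx3
              intro k2 rest' hr
              subst hr
              have := G1 k2 (by rw [hsuf]; simp)
              omega


-- ---------- assembling the two normal forms ----------

theorem pvFoldl_flat (g : Char → List Int) :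
    ∀ (ks : List Char) (r : Int),
      ks.foldl (fun res c => (g c).foldl max res) r = (ks.flatMap g).foldl max r := by
  intro ks
  induction ks with
  | nil => intro r; rfl
  | cons k t ih =>
    intro r
    simp only [List.foldl_cons, List.flatMap_cons, List.foldl_append]
    exact ih _

theorem pvAltNorm (S : String) :
    maxRepOpt11_alt S = ((PySem.Set.ofList S.toList).flatMap
      (fun c => pvRunCands ((S.toList.count c : Int)) c (pvRunsA S.toList) 0 0)).foldl max 0 := by
  simp only [maxRepOpt11_alt]
  rw [PySem.Dict.foldl_insert_getD_add_one_eq_counter, PySem.Dict.keys_counter]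
  refine Eq.trans (PySem.List.foldl_congr_mem' _ _ _ _ ?_) (pvFoldl_flat _ _ _)
  intro c _ acc
  rw [pvInnerB_eq_foldl, pvCharCands_eq_runCands, PySem.Dict.getD_counter]

theorem maxRepOpt11_eq (S : String) (h : S.toList ≠ []) :
    maxRepOpt11 S = maxRepOpt11_alt S := by
  obtain ⟨ch, cs, hL⟩ := List.exists_cons_of_ne_nil h
  have hR0 : pvRunsA (ch :: cs)
      = (ch, 1 + ((cs.takeWhile (fun x => x == ch)).length : Int))
          :: pvRunsA (cs.dropWhile (fun x => x == ch)) := by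
    rw [pvRunsA]
  -- B's normal form: max over all candidates of all distinct characters
  have hB : maxRepOpt11_alt S = ((PySem.Set.ofList (ch :: cs)).flatMap
      (fun c => pvRunCands (((ch :: cs).count c : Int)) c (pvRunsA (ch :: cs)) 0 0)).foldl
        max 0 := by
    rw [pvAltNorm, hL]
  -- A's normal form: merge fold over 3-windows on top of the base fold over run terms
  have hA : maxRepOpt11 S
      = (pvWin (pvRunsA (ch :: cs))).foldl (pvMStep (PySem.Dict.counter (ch :: cs)))
          (((pvRunsA (cs.dropWhile (fun x => x == ch))).map
              (pvF (PySem.Dict.counter (ch :: cs)))).foldl max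
            (pvF (PySem.Dict.counter (ch :: cs))
              (ch, 1 + ((cs.takeWhile (fun x => x == ch)).length : Int)))) := by
    unfold maxRepOpt11
    rw [hL, pvLoopA_eq_win]
    rw [hR0, List.map_cons]
    rfl
  -- shared context
  have hcnt : ∀ c : Char, (PySem.Dict.counter (ch :: cs)).getD c 0 = (((ch :: cs).count c : Nat) : Int) :=
    fun c => PySem.Dict.getD_counter _ _
  have hGpos : ∀ p ∈ pvRunsA (ch :: cs), 1 ≤ p.2 := fun p hp => pvRuns_pos _ p hp
  have hGch : List.IsChain (fun a b : Char × Int => a.1 ≠ b.1) (pvRunsA (ch :: cs)) :=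
    pvRuns_chain _
  -- fact (a): every run term is at most A's value
  have hFle : ∀ p ∈ pvRunsA (ch :: cs),
      pvF (PySem.Dict.counter (ch :: cs)) p ≤ maxRepOpt11 S := by
    intro p hp
    rw [hA]
    refine le_trans ?_ (pvMStep_le_foldl _ _ _)
    rw [hR0] at hp
    rcases List.mem_cons.mp hp with rfl | hp'
    · exact (PySem.List.le_foldl_max _ _).1
    · exact (PySem.List.le_foldl_max _ _).2 _ (List.mem_map_of_mem hp')
  -- fact (b): every merge term is at most A's value
  have hMle : ∀ t ∈ pvWin (pvRunsA (ch :: cs)),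
      (t.1.1 == t.2.2.1 && t.2.1.2 == 1) = true →
      min (t.1.2 + t.2.2.2 + 1) ((PySem.Dict.counter (ch :: cs)).getD t.2.2.1 0)
        ≤ maxRepOpt11 S := by
    intro t ht hc
    rw [hA]
    exact pvMStep_mem_le_foldl _ _ _ t ht hc
  -- fact (c): A's value is at least 1
  have hM1 : 1 ≤ maxRepOpt11 S := by
    have hmem : (ch, 1 + ((cs.takeWhile (fun x => x == ch)).length : Int)) ∈ pvRunsA (ch :: cs) := by
      rw [hR0]; simp
    have h1 : (1 : Int) ≤ pvF (PySem.Dict.counter (ch :: cs))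
        (ch, 1 + ((cs.takeWhile (fun x => x == ch)).length : Int)) := by
      unfold pvF
      rw [hcnt ch]
      have hcpos : 1 ≤ (ch :: cs).count ch := by
        simp [List.count_cons_self]
      have hlen : (0 : Int) ≤ ((cs.takeWhile (fun x => x == ch)).length : Int) :=
        Int.natCast_nonneg _
      omega
    exact le_trans h1 (hFle _ hmem)
  -- every character of a run occurs in the string, hence in the key set, with count ≥ 1
  have hkeymem : ∀ c : Char, c ∈ (ch :: cs) → c ∈ PySem.Set.ofList (ch :: cs) :=
    fun c hc => (PySem.Set.mem_ofList _ _).mpr hc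
  have hcount1 : ∀ c : Char, c ∈ (ch :: cs) → 1 ≤ (((ch :: cs).count c : Nat) : Int) := by
    intro c hc
    have := List.count_pos_iff.mpr hc
    omega
  rw [hB]
  apply le_antisymm
  · -- A ≤ B
    rw [hA]
    apply pvMStep_foldl_le
    · -- the base fold over run terms
      apply pvFoldlMax_le
      · -- head run term
        refine ?_  -- min(k1+1, count ch) ≤ B
        have hmem : (ch, 1 + ((cs.takeWhile (fun x => x == ch)).length : Int))
            ∈ pvRunsA (ch :: cs) := by rw [hR0]; simp
        have hchmem : ch ∈ (ch :: cs) := by simp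
        obtain ⟨x, hx, hle⟩ := pvArun (((ch :: cs).count ch : Nat) : Int) ch
          (pvRunsA (ch :: cs)) 0 0 _ hGpos hGch (le_refl _) (le_refl _)
          (Or.inr (le_of_eq (pvCount_eq_sumC ch (ch :: cs)))) hmem
        refine le_trans ?_ (le_trans hle ((PySem.List.le_foldl_max _ _).2 x
          (List.mem_flatMap.mpr ⟨ch, hkeymem ch hchmem, hx⟩)))
        unfold pvF
        rw [hcnt ch]
      · -- remaining run terms
        intro y hy
        obtain ⟨p, hp, rfl⟩ := List.mem_map.mp hy
        have hpmem : p ∈ pvRunsA (ch :: cs) := by rw [hR0]; simp [hp]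
        obtain ⟨c, k⟩ := p
        have hcmem : c ∈ (ch :: cs) := pvRuns_char_mem _ (c, k) hpmem
        obtain ⟨x, hx, hle⟩ := pvArun (((ch :: cs).count c : Nat) : Int) c
          (pvRunsA (ch :: cs)) 0 0 k hGpos hGch (le_refl _) (le_refl _)
          (Or.inr (le_of_eq (pvCount_eq_sumC c (ch :: cs)))) hpmem
        refine le_trans ?_ (le_trans hle ((PySem.List.le_foldl_max _ _).2 x
          (List.mem_flatMap.mpr ⟨c, hkeymem c hcmem, hx⟩)))
        unfold pvF
        rw [hcnt c]
    · -- the merge terms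
      intro t ht hc
      obtain ⟨⟨a1, a2⟩, ⟨b1, b2⟩, ⟨c1, c2⟩⟩ := t
      obtain ⟨hc1, hc2⟩ : a1 = c1 ∧ b2 = 1 := by simpa using hc
      subst hc2
      have hc1s := hc1.symm
      subst hc1s
      obtain ⟨X, Y, hXY⟩ := pvWin_decomp _ _ ht
      simp only at hXY
      have hmid : ¬ b1 = c1 := by
        have hsfx : List.IsChain (fun a b : Char × Int => a.1 ≠ b.1)
            ((c1, a2) :: (b1, 1) :: (c1, c2) :: Y) := hGch.suffix ⟨X, hXY.symm⟩
        have := (List.isChain_cons_cons.mp (List.isChain_cons.mp hsfx).2).1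
        simpa using this
      have hcmem : c1 ∈ (ch :: cs) := by
        refine pvRuns_char_mem _ (c1, c2) ?_
        rw [hXY]; simp
      obtain ⟨x, hx, hle⟩ := pvAmerge (((ch :: cs).count c1 : Nat) : Int) c1
        X (pvRunsA (ch :: cs)) 0 0 a2 c2 b1 Y hXY hmid hGpos
        (le_refl _) (le_refl _)
      refine le_trans ?_ (le_trans hle ((PySem.List.le_foldl_max _ _).2 x
        (List.mem_flatMap.mpr ⟨c1, hkeymem _ hcmem, hx⟩)))
      rw [hcnt c1]
  · -- B ≤ A
    apply pvFoldlMax_le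
    · omega
    · intro x hx
      obtain ⟨c, hck, hxc⟩ := List.mem_flatMap.mp hx
      have hcL : c ∈ (ch :: cs) := (PySem.Set.mem_ofList _ _).mp hck
      have hGc : 1 ≤ (((ch :: cs).count c : Nat) : Int) := hcount1 c hcL
      refine pvBleA (((ch :: cs).count c : Nat) : Int) c (pvRunsA (ch :: cs)) (maxRepOpt11 S)
        ?_ ?_ hM1 hGc hGpos hGch (pvRunsA (ch :: cs)) [] 0 0 rfl (le_refl _) (le_refl _)
        (by omega) (fun _ _ _ => rfl) ?_ (by omega) (by omega) x hxc
      · -- G1: run terms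
        intro k hk
        have := hFle (c, k) hk
        unfold pvF at this
        rw [hcnt c] at this
        exact this
      · -- G2: merge terms
        intro X k1 d k2 Y hdecomp
        have hwin : ((c, k1), (d, 1), (c, k2)) ∈ pvWin (pvRunsA (ch :: cs)) := by
          rw [hdecomp]
          exact pvWin_mem_of_decomp X _ _ _ Y
        have := hMle ((c, k1), (d, 1), (c, k2)) hwin (by simp)
        rw [hcnt c] at this
        simpa using this
      · -- initial h3
        intro k rest hr
        have hkmem : (c, k) ∈ pvRunsA (ch :: cs) := by rw [hr]; simp
        have := hFle (c, k) hkmem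
        unfold pvF at this
        rw [hcnt c] at this
        omega

-- ===== VERDICT (by name: the statement is the Claim_ definition above) =====
theorem maxRepOpt11_raises : Claim_raises_maxRepOpt11 := by
  unfold Claim_raises_maxRepOpt11
  constructor
  · intro S _ hr hp; exact hp hr
  · refine ⟨by decide, by decide, ?_⟩
    simp [maxRepOpt11_alt, pvRaiseWitness_maxRepOpt11, pvRaiseWitnessOut_maxRepOpt11]

theorem maxRepOpt11_spec : Claim_equal_maxRepOpt11 := by
  have _ := maxRepOpt11_raises  -- the crash-fix theorem above is part of the delivered claim
  intro S _ hpre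
  exact maxRepOpt11_eq S hpre
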